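-- pv_equiv track=rewrite | github.com/michalrajkowski/advent-of-code | 2024/Day 20/part_two.py | rasterized_shortest_line
-- ===== SOURCE A (Python) =====
-- def rasterized_shortest_line(start, end):
--     """
--     Computes the shortest rasterized line between two points using horizontal and vertical moves.
--
--     :param start: Tuple (x1, y1) for the starting point
--     :param end: Tuple (x2, y2) for the ending point
--     :return: List of grid points along the shortest rasterized path
--     """
--     x1, y1 = start
--     x2, y2 = end
--     dx = abs(x2 - x1)
--     dy = abs(y2 - y1)
--     x_step = 1 if x2 > x1 else -1
--     y_step = 1 if y2 > y1 else -1
--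
--     path = [(x1, y1)]
--     error = 0  # Tracks when to alternate directions
--
--     # Bresenham-like rasterized line
--     while (x1, y1) != (x2, y2):
--         if (error + dy) < dx:
--             x1 += x_step
--             error += dy
--         else:
--             y1 += y_step
--             error -= dx
--         path.append((x1, y1))
--
--     return path
-- ===== SOURCE B (Python) =====
-- def rasterized_shortest_line(start, end):
--     """Closed-form rasterization: instead of walking the line step by step
--     with a running error term, the k-th point of the path is computed
--     directly: after k steps exactly nx(k) = max(0, (k*dx + dx - 1)//(dx+dy))
--     of them were x-moves, so the whole path is one list comprehension over
--     k = 0..dx+dy with no sequential state (each point is random-access)."""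
--     x1, y1 = start
--     x2, y2 = end
--     dx = abs(x2 - x1)
--     dy = abs(y2 - y1)
--     x_step = 1 if x2 > x1 else -1
--     y_step = 1 if y2 > y1 else -1
--     n = dx + dy
--     if n == 0:
--         return [(x1, y1)]
--     return [
--         (x1 + x_step * nx, y1 + y_step * (k - nx))
--         for k in range(n + 1)
--         for nx in [max(0, (k * dx + dx - 1) // n)]
--     ]
-- ===== Notes on version B (the rewrite author's own statement) =====
-- stated objective: alternative
-- what changed: Replaces the sequential Bresenham-style walk with its running error accumulator by a closed-form formula: the k-th path point is computed independently as nx(k) = max(0, (k*dx+dx-1)//(dx+dy)) x-moves, so the path is one stateless list comprehension with each point random-access.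
import Mathlib
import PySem

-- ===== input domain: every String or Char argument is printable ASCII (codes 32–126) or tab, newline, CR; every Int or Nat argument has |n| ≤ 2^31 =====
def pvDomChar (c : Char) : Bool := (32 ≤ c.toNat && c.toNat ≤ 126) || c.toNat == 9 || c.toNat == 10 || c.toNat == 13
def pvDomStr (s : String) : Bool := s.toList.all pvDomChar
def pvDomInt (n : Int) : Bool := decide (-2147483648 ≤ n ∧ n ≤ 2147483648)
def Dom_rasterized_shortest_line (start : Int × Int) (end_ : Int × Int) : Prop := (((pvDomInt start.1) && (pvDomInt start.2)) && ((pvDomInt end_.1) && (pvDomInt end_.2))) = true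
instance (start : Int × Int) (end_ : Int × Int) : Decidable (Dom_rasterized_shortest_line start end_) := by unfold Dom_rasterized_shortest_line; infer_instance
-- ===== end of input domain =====

-- B replaces A's sequential error-accumulator walk by a closed-form list comprehension:
-- the k-th point is computed independently via nx(k) = max(0,(k*dx+dx-1)//(dx+dy)) (objective: alternative).


-- ===== PORT A =====
-- A's while-loop: stops when (x1,y1) = (x2,y2); fuel only makes it total
-- (the loop takes exactly dx+dy iterations, which the caller supplies).
def rslLoopA (x2 y2 dx dy x_step y_step : Int) :
    Nat → Int → Int → Int → List (Int × Int) → List (Int × Int)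
  | 0, _, _, _, path => path
  | fuel + 1, x1, y1, error, path =>
    if (x1, y1) ≠ (x2, y2) then
      if error + dy < dx then
        rslLoopA x2 y2 dx dy x_step y_step fuel (x1 + x_step) y1 (error + dy)
          (path ++ [(x1 + x_step, y1)])
      else
        rslLoopA x2 y2 dx dy x_step y_step fuel x1 (y1 + y_step) (error - dx)
          (path ++ [(x1, y1 + y_step)])
    else path

def rasterized_shortest_line (start : Int × Int) (end_ : Int × Int) : List (Int × Int) :=
  let x1 := start.1; let y1 := start.2
  let x2 := end_.1; let y2 := end_.2
  let dx := |x2 - x1|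
  let dy := |y2 - y1|
  let x_step : Int := if x2 > x1 then 1 else -1
  let y_step : Int := if y2 > y1 then 1 else -1
  rslLoopA x2 y2 dx dy x_step y_step (dx + dy).toNat x1 y1 0 [(x1, y1)]

-- ===== PORT B =====
-- Source B's stateless comprehension over range(n+1), each point from the closed form.
def rasterized_shortest_line_alt (start : Int × Int) (end_ : Int × Int) : List (Int × Int) :=
  let x1 := start.1; let y1 := start.2
  let x2 := end_.1; let y2 := end_.2
  let dx := |x2 - x1|
  let dy := |y2 - y1|
  let x_step : Int := if x2 > x1 then 1 else -1
  let y_step : Int := if y2 > y1 then 1 else -1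
  let n := dx + dy
  if n = 0 then [(x1, y1)]
  else
    (PySem.List.pyRange 0 (n + 1) 1).map (fun k =>
      let nx := max 0 (PySem.Int.floordiv (k * dx + dx - 1) n)
      (x1 + x_step * nx, y1 + y_step * (k - nx)))

-- ===== PRECONDITION & SPEC =====
def Spec_rasterized_shortest_line (start : Int × Int) (end_ : Int × Int) (out : List (Int × Int)) : Prop := out = rasterized_shortest_line_alt start end_
instance (start : Int × Int) (end_ : Int × Int) (out : List (Int × Int)) : Decidable (Spec_rasterized_shortest_line start end_ out) := by unfold Spec_rasterized_shortest_line; infer_instance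

-- ===== CLAIM (what is proved, stated in full; the proofs are below) =====
def Claim_equal_rasterized_shortest_line : Prop := ∀ (start : Int × Int) (end_ : Int × Int), Dom_rasterized_shortest_line start end_ → Spec_rasterized_shortest_line start end_ (rasterized_shortest_line start end_)

-- ===== LEMMAS AND PROOFS =====

-- number of x-moves after k steps, in closed form (matches the formula in B's port)
def rslF (dx dy k : Int) : Int := max 0 (PySem.Int.floordiv (k * dx + dx - 1) (dx + dy))

-- the k-th point of the path
def rslPt (x1 y1 xs ys dx dy k : Int) : Int × Int :=
  (x1 + xs * rslF dx dy k, y1 + ys * (k - rslF dx dy k))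

theorem rslF_zero (dx dy : Int) (hdx : 0 ≤ dx) (hdy : 0 ≤ dy) (hn : 0 < dx + dy) :
    rslF dx dy 0 = 0 := by
  unfold rslF
  have h1 : PySem.Int.floordiv (0 * dx + dx - 1) (dx + dy) < 1 := by
    rw [PySem.Int.floordiv_lt_iff_lt_mul hn]; nlinarith
  omega

theorem rslF_step_x (dx dy k : Int) (hdx : 0 ≤ dx) (hdy : 0 ≤ dy) (hk : 0 ≤ k)
    (hkn : k < dx + dy)
    (hC : rslF dx dy k * dy - (k - rslF dx dy k) * dx + dy < dx) :
    rslF dx dy (k + 1) = rslF dx dy k + 1 := by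
  have hn : 0 < dx + dy := by omega
  set f := rslF dx dy k with hf
  have hf0 : 0 ≤ f := le_max_left _ _
  have hq1 : PySem.Int.floordiv (k * dx + dx - 1) (dx + dy) ≤ f := le_max_right _ _
  have ha1 : k * dx + dx - 1 < (f + 1) * (dx + dy) :=
    (PySem.Int.floordiv_lt_iff_lt_mul hn).mp (by omega)
  have hfn : f * (dx + dy) ≤ k * dx + dx - dy - 1 := by nlinarith
  have hlow : f + 1 ≤ PySem.Int.floordiv ((k + 1) * dx + dx - 1) (dx + dy) := by
    rw [PySem.Int.le_floordiv_iff_mul_le hn]; nlinarith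
  have hhigh : PySem.Int.floordiv ((k + 1) * dx + dx - 1) (dx + dy) < f + 2 := by
    rw [PySem.Int.floordiv_lt_iff_lt_mul hn]; nlinarith
  simp only [rslF] at hf ⊢; omega

theorem rslF_step_y (dx dy k : Int) (hdx : 0 ≤ dx) (hdy : 0 ≤ dy) (hk : 0 ≤ k)
    (hkn : k < dx + dy)
    (hC : ¬ (rslF dx dy k * dy - (k - rslF dx dy k) * dx + dy < dx)) :
    rslF dx dy (k + 1) = rslF dx dy k := by
  have hn : 0 < dx + dy := by omega
  set f := rslF dx dy k with hf
  have hf0 : 0 ≤ f := le_max_left _ _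
  have hq1 : PySem.Int.floordiv (k * dx + dx - 1) (dx + dy) ≤ f := le_max_right _ _
  have hb1 : PySem.Int.floordiv (k * dx + dx - 1) (dx + dy) * (dx + dy) ≤ k * dx + dx - 1 :=
    (PySem.Int.le_floordiv_iff_mul_le hn).mp le_rfl
  have hfn : k * dx + dx - dy - 1 < f * (dx + dy) := by nlinarith
  have hmono : PySem.Int.floordiv (k * dx + dx - 1) (dx + dy)
      ≤ PySem.Int.floordiv ((k + 1) * dx + dx - 1) (dx + dy) := by
    rw [PySem.Int.le_floordiv_iff_mul_le hn]; nlinarith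
  have hhigh : PySem.Int.floordiv ((k + 1) * dx + dx - 1) (dx + dy) < f + 1 := by
    rw [PySem.Int.floordiv_lt_iff_lt_mul hn]; nlinarith
  simp only [rslF] at hf ⊢; omega

-- A's loop, started from the closed-form state after k steps, appends the
-- closed-form points k+1 .. dx+dy.
theorem loopA_closed (x1 y1 dx dy xs ys : Int)
    (hx : xs = 1 ∨ xs = -1) (hy : ys = 1 ∨ ys = -1)
    (hdx : 0 ≤ dx) (hdy : 0 ≤ dy) (hn : 0 < dx + dy) :
    ∀ (m : Nat) (k : Int) (path : List (Int × Int)), 0 ≤ k → (m : Int) = dx + dy - k →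
    rslLoopA (x1 + xs * dx) (y1 + ys * dy) dx dy xs ys m
      (x1 + xs * rslF dx dy k) (y1 + ys * (k - rslF dx dy k))
      (rslF dx dy k * dy - (k - rslF dx dy k) * dx) path
      = path ++ (PySem.List.pyRange (k + 1) (dx + dy + 1) 1).map
          (fun j => rslPt x1 y1 xs ys dx dy j) := by
  intro m
  induction m with
  | zero =>
    intro k path hk hm
    have hk' : k = dx + dy := by omega
    subst hk'
    have : PySem.List.pyRange (dx + dy + 1) (dx + dy + 1) 1 = [] := by
      rw [PySem.List.pyRange_one]; simp
    rw [rslLoopA, this]; simp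
  | succ m ih =>
    intro k path hk hm
    have hkn : k < dx + dy := by omega
    have hne : ((x1 + xs * rslF dx dy k, y1 + ys * (k - rslF dx dy k)) : Int × Int)
        ≠ (x1 + xs * dx, y1 + ys * dy) := by
      intro h
      have hx' := congrArg Prod.fst h
      have hy' := congrArg Prod.snd h
      simp only at hx' hy'
      have e1 : rslF dx dy k = dx := by rcases hx with h1 | h1 <;> rw [h1] at hx' <;> omega
      have e2 : k - rslF dx dy k = dy := by rcases hy with h1 | h1 <;> rw [h1] at hy' <;> omega
      omega
    rw [rslLoopA, if_pos hne]
    have hrange : PySem.List.pyRange (k + 1) (dx + dy + 1) 1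
        = (k + 1) :: PySem.List.pyRange (k + 1 + 1) (dx + dy + 1) 1 :=
      PySem.List.pyRange_one_cons (by omega)
    by_cases hC : rslF dx dy k * dy - (k - rslF dx dy k) * dx + dy < dx
    · rw [if_pos hC]
      have hs := rslF_step_x dx dy k hdx hdy hk hkn hC
      have key := ih (k + 1) (path ++ [(x1 + xs * rslF dx dy k + xs, y1 + ys * (k - rslF dx dy k))])
        (by omega) (by omega)
      rw [hs] at key
      have e1 : x1 + xs * (rslF dx dy k + 1) = x1 + xs * rslF dx dy k + xs := by ring
      have e2 : y1 + ys * (k + 1 - (rslF dx dy k + 1)) = y1 + ys * (k - rslF dx dy k) := by ring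
      have e3 : (rslF dx dy k + 1) * dy - (k + 1 - (rslF dx dy k + 1)) * dx
          = rslF dx dy k * dy - (k - rslF dx dy k) * dx + dy := by ring
      rw [e1, e2, e3] at key
      rw [key, hrange]
      have ept : rslPt x1 y1 xs ys dx dy (k + 1)
          = (x1 + xs * rslF dx dy k + xs, y1 + ys * (k - rslF dx dy k)) := by
        unfold rslPt; rw [hs]; exact Prod.ext (by ring) (by ring)
      simp [ept]
    · rw [if_neg hC]
      have hs := rslF_step_y dx dy k hdx hdy hk hkn hC
      have key := ih (k + 1) (path ++ [(x1 + xs * rslF dx dy k, y1 + ys * (k - rslF dx dy k) + ys)])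
        (by omega) (by omega)
      rw [hs] at key
      have e2 : y1 + ys * (k + 1 - rslF dx dy k) = y1 + ys * (k - rslF dx dy k) + ys := by ring
      have e3 : rslF dx dy k * dy - (k + 1 - rslF dx dy k) * dx
          = rslF dx dy k * dy - (k - rslF dx dy k) * dx - dx := by ring
      rw [e2, e3] at key
      rw [key, hrange]
      have ept : rslPt x1 y1 xs ys dx dy (k + 1)
          = (x1 + xs * rslF dx dy k, y1 + ys * (k - rslF dx dy k) + ys) := by
        unfold rslPt; rw [hs]; exact Prod.ext (by ring) (by ring)
      simp [ept]

-- ===== VERDICT (by name: the statement is the Claim_ definition above) =====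
theorem rasterized_shortest_line_spec : Claim_equal_rasterized_shortest_line := by
  intro start end_ _
  obtain ⟨x1, y1⟩ := start
  obtain ⟨x2, y2⟩ := end_
  unfold Spec_rasterized_shortest_line rasterized_shortest_line rasterized_shortest_line_alt
  simp only
  set dx := |x2 - x1| with hdx
  set dy := |y2 - y1| with hdy
  set xs : Int := if x2 > x1 then 1 else -1 with hxs
  set ys : Int := if y2 > y1 then 1 else -1 with hys
  have hx : xs = 1 ∨ xs = -1 := by rw [hxs]; split_ifs <;> simp
  have hy : ys = 1 ∨ ys = -1 := by rw [hys]; split_ifs <;> simp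
  have hdx0 : 0 ≤ dx := abs_nonneg _
  have hdy0 : 0 ≤ dy := abs_nonneg _
  have hex : x2 = x1 + xs * dx := by
    rw [hdx, hxs]; split_ifs with h
    · rw [abs_of_nonneg (by omega)]; ring
    · rw [abs_of_nonpos (by omega)]; ring
  have hey : y2 = y1 + ys * dy := by
    rw [hdy, hys]; split_ifs with h
    · rw [abs_of_nonneg (by omega)]; ring
    · rw [abs_of_nonpos (by omega)]; ring
  by_cases h0 : dx + dy = 0
  · rw [if_pos h0]
    have hdx' : dx = 0 := by omega
    have hdy' : dy = 0 := by omega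
    have : (dx + dy).toNat = 0 := by omega
    rw [this, rslLoopA]
  · rw [if_neg h0]
    have hn : 0 < dx + dy := by omega
    have key := loopA_closed x1 y1 dx dy xs ys hx hy hdx0 hdy0 hn
      (dx + dy).toNat 0 [(x1, y1)] le_rfl (by omega)
    rw [rslF_zero dx dy hdx0 hdy0 hn] at key
    simp only [mul_zero, sub_zero, zero_mul, add_zero] at key
    have hrange0 : PySem.List.pyRange 0 (dx + dy + 1) 1
        = 0 :: PySem.List.pyRange (0 + 1) (dx + dy + 1) 1 := PySem.List.pyRange_one_cons (by omega)
    rw [hex, hey, key, hrange0]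
    have h00 : max 0 (PySem.Int.floordiv (0 * dx + dx - 1) (dx + dy)) = 0 := by
      have := rslF_zero dx dy hdx0 hdy0 hn
      simpa only [rslF] using this
    simp only [List.map_cons, h00, mul_zero, add_zero, sub_zero, rslPt, rslF]
    simp
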